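-- pv_equiv track=rewrite | github.com/Aniketxmishra/Blink_Main | scripts/ablation_study.py | detect_arch_family
-- ===== SOURCE A (Python) =====
-- def detect_arch_family(model_name):
--     """Detect architecture family as a categorical feature for XGBoost."""
--     families = {
--         'cnn_residual': ['resnet18', 'resnet50', 'resnext50_32x4d', 'wide_resnet50_2'],
--         'cnn_dense': ['densenet121', 'densenet169', 'densenet201'],
--         'cnn_plain': ['vgg16', 'vgg19'],
--         'cnn_mobile': ['mobilenet_v2', 'mobilenet_v3_large', 'mobilenet_v3_small',
--                        'shufflenet_v2_x1_0', 'mnasnet1_0', 'squeezenet1_0'],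
--         'cnn_efficient': ['efficientnet_b0', 'efficientnet_v2_s'],
--         'cnn_modern': ['convnext_tiny', 'convnext_small', 'convnext_base'],
--         'cnn_regnet': ['regnet_y_400mf', 'regnet_x_400mf', 'regnet_y_800mf'],
--         'cnn_inception': ['googlenet', 'inception_v3'],
--     }
--     for family, members in families.items():
--         if model_name in members:
--             return family
--     if 'cnn' in model_name:
--         return 'cnn_custom'
--     return 'other'
-- ===== SOURCE B (Python) =====
-- # Binary search over a pre-sorted flat (member, family) table instead of a
-- # linear scan over per-family lists; same fallback branches.
--
-- _TABLE = [
--     ('convnext_base', 'cnn_modern'),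
--     ('convnext_small', 'cnn_modern'),
--     ('convnext_tiny', 'cnn_modern'),
--     ('densenet121', 'cnn_dense'),
--     ('densenet169', 'cnn_dense'),
--     ('densenet201', 'cnn_dense'),
--     ('efficientnet_b0', 'cnn_efficient'),
--     ('efficientnet_v2_s', 'cnn_efficient'),
--     ('googlenet', 'cnn_inception'),
--     ('inception_v3', 'cnn_inception'),
--     ('mnasnet1_0', 'cnn_mobile'),
--     ('mobilenet_v2', 'cnn_mobile'),
--     ('mobilenet_v3_large', 'cnn_mobile'),
--     ('mobilenet_v3_small', 'cnn_mobile'),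
--     ('regnet_x_400mf', 'cnn_regnet'),
--     ('regnet_y_400mf', 'cnn_regnet'),
--     ('regnet_y_800mf', 'cnn_regnet'),
--     ('resnet18', 'cnn_residual'),
--     ('resnet50', 'cnn_residual'),
--     ('resnext50_32x4d', 'cnn_residual'),
--     ('shufflenet_v2_x1_0', 'cnn_mobile'),
--     ('squeezenet1_0', 'cnn_mobile'),
--     ('vgg16', 'cnn_plain'),
--     ('vgg19', 'cnn_plain'),
--     ('wide_resnet50_2', 'cnn_residual'),
-- ]
--
--
-- def _bsearch(name, table):
--     lo, hi = 0, len(table)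
--     while lo < hi:
--         mid = (lo + hi) // 2
--         key, fam = table[mid]
--         if name == key:
--             return fam
--         if name < key:
--             hi = mid
--         else:
--             lo = mid + 1
--     return None
--
--
-- def detect_arch_family(model_name):
--     """Detect architecture family as a categorical feature for XGBoost."""
--     family = _bsearch(model_name, _TABLE)
--     if family is not None:
--         return family
--     return 'cnn_custom' if 'cnn' in model_name else 'other'
-- ===== Notes on version B (the rewrite author's own statement) =====
-- stated objective: alternative
-- what changed: Replaced A's linear scan over per-family member lists by binary search on a single pre-sorted flat (member, family) table; the fallback substring branches are unchanged (correct because no member occurs in two families).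
import Mathlib
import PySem

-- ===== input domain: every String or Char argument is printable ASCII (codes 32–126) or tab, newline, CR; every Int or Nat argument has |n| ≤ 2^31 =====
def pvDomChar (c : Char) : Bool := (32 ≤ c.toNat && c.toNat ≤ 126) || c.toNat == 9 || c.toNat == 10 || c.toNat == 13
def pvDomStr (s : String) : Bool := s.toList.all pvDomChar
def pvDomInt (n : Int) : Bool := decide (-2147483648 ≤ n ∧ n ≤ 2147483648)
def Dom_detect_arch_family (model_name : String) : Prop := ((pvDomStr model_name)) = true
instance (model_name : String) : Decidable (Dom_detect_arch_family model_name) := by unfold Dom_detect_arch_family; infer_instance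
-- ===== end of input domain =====

-- B replaces A's linear scan over per-family member lists by binary search on one
-- pre-sorted flat (member, family) table, with the same fallback (objective: alternative).

-- ===== PORT A =====
-- the `families` dict literal of A, as an association list in insertion order
def familiesA : List (String × List String) :=
  [("cnn_residual", ["resnet18", "resnet50", "resnext50_32x4d", "wide_resnet50_2"]),
   ("cnn_dense", ["densenet121", "densenet169", "densenet201"]),
   ("cnn_plain", ["vgg16", "vgg19"]),
   ("cnn_mobile", ["mobilenet_v2", "mobilenet_v3_large", "mobilenet_v3_small",
                   "shufflenet_v2_x1_0", "mnasnet1_0", "squeezenet1_0"]),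
   ("cnn_efficient", ["efficientnet_b0", "efficientnet_v2_s"]),
   ("cnn_modern", ["convnext_tiny", "convnext_small", "convnext_base"]),
   ("cnn_regnet", ["regnet_y_400mf", "regnet_x_400mf", "regnet_y_800mf"]),
   ("cnn_inception", ["googlenet", "inception_v3"])]

-- A's `for family, members in families.items(): if model_name in members: return family`
def loopA (m : String) : List (String × List String) → Option String
  | [] => none
  | (family, members) :: rest =>
      if members.contains m then some family else loopA m rest

def detect_arch_family (model_name : String) : String :=
  match loopA model_name familiesA with
  | some family => family
  | none => if PySem.Str.isIn "cnn" model_name then "cnn_custom" else "other"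

-- ===== PORT B =====
-- B's `_TABLE`: the flat (member, family) table, pre-sorted by member name
def tableB : List (String × String) :=
  [("convnext_base", "cnn_modern"),
   ("convnext_small", "cnn_modern"),
   ("convnext_tiny", "cnn_modern"),
   ("densenet121", "cnn_dense"),
   ("densenet169", "cnn_dense"),
   ("densenet201", "cnn_dense"),
   ("efficientnet_b0", "cnn_efficient"),
   ("efficientnet_v2_s", "cnn_efficient"),
   ("googlenet", "cnn_inception"),
   ("inception_v3", "cnn_inception"),
   ("mnasnet1_0", "cnn_mobile"),
   ("mobilenet_v2", "cnn_mobile"),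
   ("mobilenet_v3_large", "cnn_mobile"),
   ("mobilenet_v3_small", "cnn_mobile"),
   ("regnet_x_400mf", "cnn_regnet"),
   ("regnet_y_400mf", "cnn_regnet"),
   ("regnet_y_800mf", "cnn_regnet"),
   ("resnet18", "cnn_residual"),
   ("resnet50", "cnn_residual"),
   ("resnext50_32x4d", "cnn_residual"),
   ("shufflenet_v2_x1_0", "cnn_mobile"),
   ("squeezenet1_0", "cnn_mobile"),
   ("vgg16", "cnn_plain"),
   ("vgg19", "cnn_plain"),
   ("wide_resnet50_2", "cnn_residual")]

def ltChars : List Char → List Char → Bool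
  | [], [] => false
  | [], _ :: _ => true
  | _ :: _, [] => false
  | a :: as, b :: bs => if a < b then true else if b < a then false else ltChars as bs

-- Python's `name < key` on str: lexicographic comparison by code point,
-- written out over the char lists (exact for all strings)
def ltStr (a b : String) : Bool := ltChars a.toList b.toList

-- B's `_bsearch` while-loop; `fuel` only makes the loop structurally total
-- (each iteration shrinks hi - lo, so fuel = length + 1 is never exhausted).
def bsearchGo (m : String) (t : List (String × String)) : Nat → Nat → Nat → Option String
  | _, _, 0 => none
  | lo, hi, fuel + 1 =>
      if lo < hi then
        let mid := (lo + hi) / 2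
        let p := t.getD mid ("", "")   -- t[mid]; mid < hi ≤ len t at every call
        if m = p.1 then some p.2
        else if ltStr m p.1 then bsearchGo m t lo mid fuel
        else bsearchGo m t (mid + 1) hi fuel
      else none

def bsearchB (m : String) : Option String :=
  bsearchGo m tableB 0 tableB.length (tableB.length + 1)

def detect_arch_family_alt (model_name : String) : String :=
  match bsearchB model_name with
  | some family => family
  | none => if PySem.Str.isIn "cnn" model_name then "cnn_custom" else "other"

-- ===== PRECONDITION & SPEC =====
def Spec_detect_arch_family (model_name : String) (out : String) : Prop := out = detect_arch_family_alt model_name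
instance (model_name : String) (out : String) : Decidable (Spec_detect_arch_family model_name out) := by unfold Spec_detect_arch_family; infer_instance

-- ===== CLAIM =====
def Claim_equal_detect_arch_family : Prop := ∀ (model_name : String), Dom_detect_arch_family model_name → Spec_detect_arch_family model_name (detect_arch_family model_name)

-- ===== LEMMAS AND PROOFS =====

-- all member names, in A's scan order
def allMembers : List String := familiesA.flatMap Prod.snd

-- binary search only ever returns a pair actually present in the table
lemma bsearchGo_sound (m : String) (t : List (String × String)) :
    ∀ (fuel lo hi : Nat), hi ≤ t.length →
      ∀ f, bsearchGo m t lo hi fuel = some f → (m, f) ∈ t := by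
  intro fuel
  induction fuel with
  | zero => intro lo hi _ f h; simp [bsearchGo] at h
  | succ n ih =>
      intro lo hi hhi f h
      unfold bsearchGo at h
      by_cases hlt : lo < hi
      · simp only [hlt, if_true] at h
        have hmid : (lo + hi) / 2 < t.length := by omega
        by_cases he : m = (t.getD ((lo + hi) / 2) ("", "")).1
        · simp only [he, if_true] at h
          have : t.getD ((lo + hi) / 2) ("", "") ∈ t := by
            rw [List.getD_eq_getElem t _ hmid]; exact List.getElem_mem hmid
          have hf : f = (t.getD ((lo + hi) / 2) ("", "")).2 := (Option.some.inj h).symm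
          rw [he, hf]; simpa using this
        · simp only [he, if_false] at h
          by_cases hl : ltStr m (t.getD ((lo + hi) / 2) ("", "")).1 = true
          · simp only [hl, if_true] at h
            exact ih lo ((lo + hi) / 2) (by omega) f h
          · simp only [hl] at h
            exact ih ((lo + hi) / 2 + 1) hi hhi f h
      · simp [hlt] at h

-- every key of the table is one of A's member names (both lists are literals)
lemma table_keys_in_members : ∀ p ∈ tableB, p.1 ∈ allMembers := by decide

-- if the name is in no family, A's scan returns none
lemma loopA_none (m : String) (fs : List (String × List String))
    (h : m ∉ fs.flatMap Prod.snd) : loopA m fs = none := by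
  induction fs with
  | nil => rfl
  | cons p rest ih =>
      obtain ⟨f, ms⟩ := p
      simp only [List.flatMap_cons, List.mem_append, not_or] at h
      have hc : ms.contains m = false := by
        simpa [List.contains_eq_mem] using h.1
      simp only [loopA, hc, Bool.false_eq_true, if_false]
      exact ih h.2

-- ===== VERDICT =====
theorem detect_arch_family_spec : Claim_equal_detect_arch_family := by
  intro m _
  unfold Spec_detect_arch_family
  by_cases hm : m ∈ allMembers
  · -- m is one of the 25 known member names: check each literally
    fin_cases hm <;> decide
  · -- unknown name: both searches return none, the fallbacks are identical
    have hb : bsearchB m = none := by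
      cases h : bsearchB m with
      | none => rfl
      | some f =>
          exact absurd (table_keys_in_members _ (bsearchGo_sound m tableB _ _ _ (le_refl _) f h)) hm
    have ha : loopA m familiesA = none := loopA_none m familiesA hm
    unfold detect_arch_family detect_arch_family_alt
    rw [ha, hb]
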